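-- pv_equiv track=rewrite | github.com/Dapizz01/AOC23 | day3/main.py | get_engine_number
-- ===== SOURCE A (Python) =====
-- def get_engine_number(engine, row: int, col: int, visited:[]):
--     number = engine[row][col]
--     visited.append([row, col])
--
--     if col - 1 >= 0:
--         if engine[row][col - 1].isdigit():
--             if [row, col - 1] not in visited:
--                 number = get_engine_number(engine, row, col - 1, visited) + number
--
--     if col + 1 < len(engine[row]):
--         if engine[row][col + 1].isdigit():
--             if [row, col + 1] not in visited:
--                 number = number +  get_engine_number(engine, row, col + 1, visited)
--
--     return number
-- ===== SOURCE B (Python) =====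
-- # Iterative re-implementation: two while-loops scanning left then right from the
-- # center cell instead of A's recursion; mutates `visited` with the same appends.
-- def get_engine_number(engine, row: int, col: int, visited: []):
--     number = engine[row][col]
--     visited.append([row, col])
--
--     c = col - 1
--     while c >= 0 and engine[row][c].isdigit() and [row, c] not in visited:
--         number = engine[row][c] + number
--         visited.append([row, c])
--         c -= 1
--
--     c = col + 1
--     while c < len(engine[row]) and engine[row][c].isdigit() and [row, c] not in visited:
--         number = number + engine[row][c]
--         visited.append([row, c])
--         c += 1
--
--     return number
-- ===== Notes on version B (the rewrite author's own statement) =====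
-- stated objective: simpler
-- what changed: Replaces A's recursive left/right expansion (with its per-call re-checks and string building through recursive returns) by two plain iterative while-loops that scan left then right from the center cell, prepending/appending digit cells.
import Mathlib
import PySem

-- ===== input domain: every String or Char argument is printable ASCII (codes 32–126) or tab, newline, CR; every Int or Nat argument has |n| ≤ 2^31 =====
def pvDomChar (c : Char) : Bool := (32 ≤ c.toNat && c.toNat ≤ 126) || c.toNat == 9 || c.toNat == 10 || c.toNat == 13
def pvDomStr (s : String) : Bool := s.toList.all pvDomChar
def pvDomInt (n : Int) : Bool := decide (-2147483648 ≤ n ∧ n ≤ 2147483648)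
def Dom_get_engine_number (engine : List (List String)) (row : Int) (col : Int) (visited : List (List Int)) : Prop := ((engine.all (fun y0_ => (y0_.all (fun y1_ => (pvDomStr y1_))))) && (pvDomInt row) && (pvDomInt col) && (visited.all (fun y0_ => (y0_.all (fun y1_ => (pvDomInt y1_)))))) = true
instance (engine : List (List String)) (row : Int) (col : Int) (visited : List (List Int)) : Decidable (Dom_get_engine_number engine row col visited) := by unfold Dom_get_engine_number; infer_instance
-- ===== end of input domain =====

-- B rewrites A's recursive left/right expansion as two iterative scans; return-value
-- equivalence is proved (both Pythons also mutate `visited` with the same appends).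

-- ===== PORT A =====

-- engine[row][c].isdigit() (total form; `none` is unreachable under the guards that use it)
def pvDigitAt (xs : List String) (c : Int) : Bool :=
  match PySem.List.pyGet? xs c with
  | some t => PySem.Str.strIsdigit t
  | none => false

-- A's recursion on one row (fuel makes the visited-set-growth termination explicit;
-- the fuel chosen in get_engine_number is proved sufficient in the lemmas below)
def pvAChain (xs : List String) (row : Int) : Nat → Int → List (List Int) → String × List (List Int)
  | 0, _, v => ("", v)
  | fuel+1, col, v =>
    match PySem.List.pyGet? xs col with
    | none => ("", v)
    | some s =>
      let v1 := v ++ [[row, col]]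
      let p2 : String × List (List Int) :=
        if 0 ≤ col - 1 ∧ pvDigitAt xs (col - 1) = true ∧ [row, col - 1] ∉ v1 then
          let r := pvAChain xs row fuel (col - 1) v1
          (r.1 ++ s, r.2)
        else (s, v1)
      if col + 1 < (xs.length : Int) ∧ pvDigitAt xs (col + 1) = true ∧ [row, col + 1] ∉ p2.2 then
        let r := pvAChain xs row fuel (col + 1) p2.2
        (p2.1 ++ r.1, r.2)
      else p2

def get_engine_number (engine : List (List String)) (row : Int) (col : Int) (visited : List (List Int)) : String :=
  match PySem.List.pyGet? engine row with
  | none => ""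
  | some xs => (pvAChain xs row (2 * xs.length + 1) col visited).1

-- ===== PORT B =====

-- leftward while-loop of Source B
def pvBLeft (xs : List String) (row : Int) (c : Int) (number : String) (v : List (List Int)) : String × List (List Int) :=
  if _h : 0 ≤ c ∧ pvDigitAt xs c = true ∧ [row, c] ∉ v then
    pvBLeft xs row (c - 1) (PySem.List.pyGetD xs c "" ++ number) (v ++ [[row, c]])
  else (number, v)
termination_by (c + 1).toNat
decreasing_by omega

-- rightward while-loop of Source B
def pvBRight (xs : List String) (row : Int) (c : Int) (number : String) (v : List (List Int)) : String × List (List Int) :=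
  if _h : c < (xs.length : Int) ∧ pvDigitAt xs c = true ∧ [row, c] ∉ v then
    pvBRight xs row (c + 1) (number ++ PySem.List.pyGetD xs c "") (v ++ [[row, c]])
  else (number, v)
termination_by ((xs.length : Int) - c).toNat
decreasing_by omega

def get_engine_number_alt (engine : List (List String)) (row : Int) (col : Int) (visited : List (List Int)) : String :=
  match PySem.List.pyGet? engine row with
  | none => ""
  | some xs =>
    match PySem.List.pyGet? xs col with
    | none => ""
    | some s =>
      let l := pvBLeft xs row (col - 1) s (visited ++ [[row, col]])
      (pvBRight xs row (col + 1) l.1 l.2).1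

-- ===== PRECONDITION & SPEC =====
-- Pre_ excludes exactly the inputs where A raises IndexError: the initial accesses
-- engine[row] and engine[row][col] must be in (Python, possibly negative) range;
-- every recursive access of A is then in range.
def Pre_get_engine_number (engine : List (List String)) (row : Int) (col : Int) (visited : List (List Int)) : Prop :=
  PySem.Raise.InRange engine.length row ∧
  PySem.Raise.InRange (PySem.List.pyGetD engine row []).length col
instance (engine : List (List String)) (row : Int) (col : Int) (visited : List (List Int)) : Decidable (Pre_get_engine_number engine row col visited) := by unfold Pre_get_engine_number; infer_instance

def pvWitness_get_engine_number : List (List String) × Int × Int × List (List Int) :=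
  ([["4", "6", "7", ".", "1"]], 0, 1, [])

def Spec_get_engine_number (engine : List (List String)) (row : Int) (col : Int) (visited : List (List Int)) (out : String) : Prop := out = get_engine_number_alt engine row col visited
instance (engine : List (List String)) (row : Int) (col : Int) (visited : List (List Int)) (out : String) : Decidable (Spec_get_engine_number engine row col visited out) := by unfold Spec_get_engine_number; infer_instance

-- ===== CLAIM (what is proved, stated in full; the proofs are below) =====
def Claim_equal_get_engine_number : Prop := ∀ (engine : List (List String)) (row : Int) (col : Int) (visited : List (List Int)), Dom_get_engine_number engine row col visited → Pre_get_engine_number engine row col visited → Spec_get_engine_number engine row col visited (get_engine_number engine row col visited)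

-- ===== LEMMAS AND PROOFS =====

-- number of row-`row` cells of the row (python indices -len … len-1) not yet visited
def pvU (xs : List String) (row : Int) (v : List (List Int)) : Nat :=
  (PySem.List.pyRange (-(xs.length : Int)) (xs.length : Int)).countP (fun c => decide ([row, c] ∉ v))

theorem pvU_append_le (xs : List String) (row : Int) (v w : List (List Int)) :
    pvU xs row (v ++ w) ≤ pvU xs row v := by
  unfold pvU
  apply List.countP_mono_left
  intro x _ hx
  simp only [decide_eq_true_eq, List.mem_append] at *
  tauto

theorem pvU_append_lt (xs : List String) (row : Int) (v : List (List Int)) (c : Int)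
    (h1 : -(xs.length : Int) ≤ c) (h2 : c < (xs.length : Int)) (h3 : [row, c] ∉ v) :
    pvU xs row (v ++ [[row, c]]) < pvU xs row v := by
  unfold pvU
  have hc : c ∈ PySem.List.pyRange (-(xs.length : Int)) (xs.length : Int) :=
    PySem.List.mem_pyRange_one.mpr ⟨h1, h2⟩
  obtain ⟨l1, l2, hl⟩ := List.append_of_mem hc
  rw [hl]
  rw [List.countP_append, List.countP_append, List.countP_cons, List.countP_cons]
  have m1 := List.countP_mono_left (l := l1)
    (p := fun x => decide ([row, x] ∉ v ++ [[row, c]])) (q := fun x => decide ([row, x] ∉ v))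
    (by intro x _ hx; simp only [decide_eq_true_eq, List.mem_append] at *; tauto)
  have m2 := List.countP_mono_left (l := l2)
    (p := fun x => decide ([row, x] ∉ v ++ [[row, c]])) (q := fun x => decide ([row, x] ∉ v))
    (by intro x _ hx; simp only [decide_eq_true_eq, List.mem_append] at *; tauto)
  have e1 : (decide ([row, c] ∉ v ++ [[row, c]])) = false := by simp
  have e2 : (decide ([row, c] ∉ v)) = true := by simpa using h3
  rw [e1, e2, if_neg (Bool.false_ne_true), if_pos rfl]
  omega

theorem pvU_le (xs : List String) (row : Int) (v : List (List Int)) :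
    pvU xs row v ≤ 2 * xs.length := by
  unfold pvU
  have := List.countP_le_length (l := PySem.List.pyRange (-(xs.length : Int)) (xs.length : Int))
    (p := fun c => decide ([row, c] ∉ v))
  rw [PySem.List.length_pyRange_one] at this
  omega

theorem pvDigitAt_some (xs : List String) (c : Int) (h : pvDigitAt xs c = true) :
    ∃ t, PySem.List.pyGet? xs c = some t ∧ PySem.Str.strIsdigit t = true := by
  unfold pvDigitAt at h
  cases hg : PySem.List.pyGet? xs c with
  | none => rw [hg] at h; exact absurd h (by simp)
  | some t => rw [hg] at h; exact ⟨t, rfl, h⟩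

theorem pvInRange_of_some {α : Type} (xs : List α) (i : Int) (x : α)
    (h : PySem.List.pyGet? xs i = some x) : -(xs.length : Int) ≤ i ∧ i < (xs.length : Int) := by
  by_contra hc
  have : ¬ PySem.Raise.InRange xs.length i := by
    unfold PySem.Raise.InRange; tauto
  rw [← PySem.List.pyGet?_eq_none_iff] at this
  rw [h] at this; exact absurd this (by simp)

theorem pvBLeft_stop (xs : List String) (row : Int) (c : Int) (n : String) (v : List (List Int))
    (h : [row, c] ∈ v) : pvBLeft xs row c n v = (n, v) := by
  rw [pvBLeft, dif_neg (by intro hg; exact hg.2.2 h)]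

theorem pvBRight_stop (xs : List String) (row : Int) (c : Int) (n : String) (v : List (List Int))
    (h : [row, c] ∈ v) : pvBRight xs row c n v = (n, v) := by
  rw [pvBRight, dif_neg (by intro hg; exact hg.2.2 h)]

theorem pvBLeft_eq (xs : List String) (row : Int) (c : Int) (n : String) (v : List (List Int)) :
    pvBLeft xs row c n v =
      if _h : 0 ≤ c ∧ pvDigitAt xs c = true ∧ [row, c] ∉ v then
        pvBLeft xs row (c - 1) (PySem.List.pyGetD xs c "" ++ n) (v ++ [[row, c]])
      else (n, v) := by
  rw [pvBLeft]

theorem pvBRight_eq (xs : List String) (row : Int) (c : Int) (n : String) (v : List (List Int)) :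
    pvBRight xs row c n v =
      if _h : c < (xs.length : Int) ∧ pvDigitAt xs c = true ∧ [row, c] ∉ v then
        pvBRight xs row (c + 1) (n ++ PySem.List.pyGetD xs c "") (v ++ [[row, c]])
      else (n, v) := by
  rw [pvBRight]

theorem pvBLeft_prefix (xs : List String) (row : Int) (c : Int) (n : String) (v : List (List Int)) :
    ∃ w, (pvBLeft xs row c n v).2 = v ++ w := by
  fun_induction pvBLeft xs row c n v with
  | case1 c n v h ih =>
      obtain ⟨w, hw⟩ := ih
      exact ⟨[[row, c]] ++ w, by rw [hw, List.append_assoc]⟩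
  | case2 c n v h => exact ⟨[], by simp⟩

theorem pvBLeft_factor (xs : List String) (row : Int) :
    ∀ (k : Nat) (c : Int), (c + 1).toNat ≤ k → ∀ (n : String) (v : List (List Int)),
    pvBLeft xs row c n v = ((pvBLeft xs row c "" v).1 ++ n, (pvBLeft xs row c "" v).2) := by
  intro k
  induction k with
  | zero =>
      intro c hc n v
      rw [pvBLeft_eq xs row c n v, pvBLeft_eq xs row c "" v,
          dif_neg (fun hgg => absurd hgg.1 (by omega)), dif_neg (fun hgg => absurd hgg.1 (by omega))]
      simp
  | succ k ih =>
      intro c hc n v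
      rw [pvBLeft_eq xs row c n v, pvBLeft_eq xs row c "" v]
      by_cases hg : 0 ≤ c ∧ pvDigitAt xs c = true ∧ [row, c] ∉ v
      · rw [dif_pos hg, dif_pos hg]
        rw [ih (c - 1) (by omega) (PySem.List.pyGetD xs c "" ++ n),
            ih (c - 1) (by omega) (PySem.List.pyGetD xs c "" ++ "")]
        rw [String.append_empty, String.append_assoc]
      · rw [dif_neg hg, dif_neg hg]
        simp

theorem pvBRight_factor (xs : List String) (row : Int) :
    ∀ (k : Nat) (c : Int), ((xs.length : Int) - c).toNat ≤ k → ∀ (n : String) (v : List (List Int)),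
    pvBRight xs row c n v = (n ++ (pvBRight xs row c "" v).1, (pvBRight xs row c "" v).2) := by
  intro k
  induction k with
  | zero =>
      intro c hc n v
      rw [pvBRight_eq xs row c n v, pvBRight_eq xs row c "" v,
          dif_neg (fun hgg => absurd hgg.1 (by omega : ¬ c < (xs.length : Int))),
          dif_neg (fun hgg => absurd hgg.1 (by omega : ¬ c < (xs.length : Int)))]
      simp
  | succ k ih =>
      intro c hc n v
      rw [pvBRight_eq xs row c n v, pvBRight_eq xs row c "" v]
      by_cases hg : c < (xs.length : Int) ∧ pvDigitAt xs c = true ∧ [row, c] ∉ v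
      · rw [dif_pos hg, dif_pos hg]
        rw [ih (c + 1) (by omega) (n ++ PySem.List.pyGetD xs c ""),
            ih (c + 1) (by omega) ("" ++ PySem.List.pyGetD xs c "")]
        rw [String.empty_append, String.append_assoc]
      · rw [dif_neg hg, dif_neg hg]
        simp

-- key lemma: one call of A's recursion = center value, then B's left scan, then B's right scan
theorem pvTop (xs : List String) (row : Int) :
    ∀ (fuel : Nat) (c : Int) (v : List (List Int)) (s : String),
    pvU xs row (v ++ [[row, c]]) < fuel → PySem.List.pyGet? xs c = some s →
    pvAChain xs row fuel c v =
      pvBRight xs row (c + 1) (pvBLeft xs row (c - 1) s (v ++ [[row, c]])).1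
        (pvBLeft xs row (c - 1) s (v ++ [[row, c]])).2 := by
  intro fuel
  induction fuel with
  | zero => intro c v s hf _; exact absurd hf (by omega)
  | succ fuel ih =>
      intro c v s hf hs
      have hfle : pvU xs row (v ++ [[row, c]]) ≤ fuel := by omega
      rw [pvAChain]
      rw [hs]
      simp only []
      set v1 := v ++ [[row, c]] with hv1
      -- left phase
      have hleft :
          (if 0 ≤ c - 1 ∧ pvDigitAt xs (c - 1) = true ∧ [row, c - 1] ∉ v1 then
            let r := pvAChain xs row fuel (c - 1) v1
            (r.1 ++ s, r.2)
          else (s, v1)) = pvBLeft xs row (c - 1) s v1 := by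
        by_cases hg : 0 ≤ c - 1 ∧ pvDigitAt xs (c - 1) = true ∧ [row, c - 1] ∉ v1
        · obtain ⟨t, ht, _⟩ := pvDigitAt_some xs (c - 1) hg.2.1
          obtain ⟨hr1, hr2⟩ := pvInRange_of_some xs (c - 1) t ht
          have hdrop := pvU_append_lt xs row v1 (c - 1) hr1 hr2 hg.2.2
          have hrec := ih (c - 1) v1 t (by omega) ht
          have hc1 : c - 1 + 1 = c := by omega
          rw [hc1] at hrec
          have hmem : [row, c] ∈ (pvBLeft xs row (c - 1 - 1) t (v1 ++ [[row, c - 1]])).2 := by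
            obtain ⟨w, hw⟩ := pvBLeft_prefix xs row (c - 1 - 1) t (v1 ++ [[row, c - 1]])
            rw [hw, hv1]; simp
          rw [pvBRight_stop _ _ _ _ _ hmem] at hrec
          rw [if_pos hg, hrec]
          -- RHS
          conv_rhs => rw [pvBLeft_eq xs row (c - 1) s v1, dif_pos hg]
          have hgd : PySem.List.pyGetD xs (c - 1) "" = t := by
            unfold PySem.List.pyGetD; rw [ht]; rfl
          rw [hgd]
          rw [pvBLeft_factor xs row (c - 1).toNat (c - 1 - 1) (by omega) (t ++ s),
              pvBLeft_factor xs row (c - 1).toNat (c - 1 - 1) (by omega) t]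
          simp only [String.append_assoc]
        · rw [if_neg hg]
          rw [pvBLeft_eq xs row (c - 1) s v1, dif_neg hg]
      rw [hleft]
      set L := pvBLeft xs row (c - 1) s v1 with hL
      obtain ⟨wL, hwL⟩ := pvBLeft_prefix xs row (c - 1) s v1
      rw [← hL] at hwL
      have hULe : pvU xs row L.2 ≤ pvU xs row v1 := by rw [hwL]; exact pvU_append_le ..
      have hmemc : [row, c] ∈ L.2 := by rw [hwL, hv1]; simp
      -- right phase
      by_cases hg : c + 1 < (xs.length : Int) ∧ pvDigitAt xs (c + 1) = true ∧ [row, c + 1] ∉ L.2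
      · obtain ⟨t, ht, _⟩ := pvDigitAt_some xs (c + 1) hg.2.1
        obtain ⟨hr1, hr2⟩ := pvInRange_of_some xs (c + 1) t ht
        have hdrop := pvU_append_lt xs row L.2 (c + 1) hr1 hr2 hg.2.2
        have hrec := ih (c + 1) L.2 t (by omega) ht
        have hc1 : c + 1 - 1 = c := by omega
        rw [hc1] at hrec
        rw [pvBLeft_stop _ _ _ _ _ (by simp [hmemc])] at hrec
        rw [if_pos hg, hrec]
        conv_rhs => rw [pvBRight_eq xs row (c + 1) L.1 L.2, dif_pos hg]
        have hgd : PySem.List.pyGetD xs (c + 1) "" = t := by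
          unfold PySem.List.pyGetD; rw [ht]; rfl
        rw [hgd]
        rw [pvBRight_factor xs row ((xs.length : Int) - (c + 1 + 1)).toNat (c + 1 + 1) (by omega) (L.1 ++ t),
            pvBRight_factor xs row ((xs.length : Int) - (c + 1 + 1)).toNat (c + 1 + 1) (by omega) t]
        simp only [String.append_assoc]
      · rw [if_neg hg]
        rw [pvBRight_eq xs row (c + 1) L.1 L.2, dif_neg hg]

-- ===== VERDICT (by name: the statement is the Claim_ definition above) =====
theorem get_engine_number_spec : Claim_equal_get_engine_number := by
  intro engine row col visited _ hpre
  obtain ⟨hrow, hcol⟩ := hpre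
  unfold Spec_get_engine_number get_engine_number get_engine_number_alt
  obtain ⟨xs, hg⟩ : ∃ xs, PySem.List.pyGet? engine row = some xs := by
    cases hE : PySem.List.pyGet? engine row with
    | none => exact absurd hrow ((PySem.List.pyGet?_eq_none_iff _ _).mp hE)
    | some xs => exact ⟨xs, rfl⟩
  have hxs : PySem.List.pyGetD engine row [] = xs := by
    unfold PySem.List.pyGetD; rw [hg]; rfl
  rw [hxs] at hcol
  obtain ⟨s, hs⟩ : ∃ s, PySem.List.pyGet? xs col = some s := by
    cases hE : PySem.List.pyGet? xs col with
    | none => exact absurd hcol ((PySem.List.pyGet?_eq_none_iff _ _).mp hE)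
    | some s => exact ⟨s, rfl⟩
  have hfuel : pvU xs row (visited ++ [[row, col]]) < 2 * xs.length + 1 := by
    have := pvU_le xs row (visited ++ [[row, col]])
    omega
  simp only [hg, hs]
  exact congrArg Prod.fst (pvTop xs row (2 * xs.length + 1) col visited s hfuel hs)
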